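-- pv_equiv track=rewrite | github.com/blzzua/codewars | 6-kyu/simple_fun_340_minimum_possible_maximum_gap.py | min_max_gap
-- ===== SOURCE A (Python) =====
-- def max_gap(a):
--     return max(j-i for i, j in zip(a,a[1:]))
--
-- def min_max_gap(arr):
--     res = arr[-1] - arr[0]
--     for i in range(1, len(arr)-1):
--         a = arr[:]
--         a.pop(i)
--         gap = max_gap(a)
--         if res > gap:
--             res = gap
--     return res
-- ===== SOURCE B (Python) =====
-- def min_max_gap(arr):
--     res = arr[-1] - arr[0]
--     gaps = [b - a for a, b in zip(arr, arr[1:])]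
--     m = len(gaps)
--     if m < 2:
--         return res
--     # suffix maxima, built back-to-front: after reversing, suf[k] = max(gaps[k:])
--     suf = [gaps[-1]]
--     for g in reversed(gaps[:-1]):
--         suf.append(max(g, suf[-1]))
--     suf.reverse()
--     q = None  # running max of gaps[:i-1]
--     for i in range(1, m):
--         cand = gaps[i - 1] + gaps[i]
--         if q is not None:
--             cand = max(cand, q)
--         if i + 1 < m:
--             cand = max(cand, suf[i + 1])
--         res = min(res, cand)
--         q = gaps[i - 1] if q is None else max(q, gaps[i - 1])
--     return res
-- ===== Notes on version B (the rewrite author's own statement) =====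
-- stated objective: faster
-- what changed: Instead of rebuilding the list and rescanning all gaps for every removed element, B computes the gap list once, precomputes suffix maxima and a running prefix maximum, and gets each removal's max gap in O(1) as max(prefix, merged gap, suffix).
import Mathlib
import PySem

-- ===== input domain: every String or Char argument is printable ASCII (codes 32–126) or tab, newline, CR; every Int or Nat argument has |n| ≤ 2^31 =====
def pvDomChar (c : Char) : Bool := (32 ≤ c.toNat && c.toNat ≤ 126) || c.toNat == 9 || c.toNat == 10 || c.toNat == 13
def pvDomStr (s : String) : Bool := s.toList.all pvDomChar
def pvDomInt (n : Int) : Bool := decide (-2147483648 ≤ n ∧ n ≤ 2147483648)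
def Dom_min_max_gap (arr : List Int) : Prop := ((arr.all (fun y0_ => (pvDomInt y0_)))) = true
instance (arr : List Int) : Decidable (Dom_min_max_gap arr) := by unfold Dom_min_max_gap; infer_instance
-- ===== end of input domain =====

-- B replaces A's rebuild-and-rescan per removed element by one gap list with precomputed
-- suffix maxima and a running prefix maximum: O(1) per removal (objective: faster).

-- ===== PORT A =====
-- max(j-i for i, j in zip(a, a[1:])); in A it is only called on lists of length ≥ 2
def pvMaxGap (a : List Int) : Int :=
  match PySem.List.max? ((a.zip (PySem.List.slice a (some 1) none)).map (fun p => p.2 - p.1)) (fun y => y) with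
  | some m => m
  | none => 0   -- Python raises ValueError on an empty generator; unreachable in A's use

-- one iteration of A's loop body
def pvAStep (arr : List Int) (res : Int) (i : Int) : Int :=
  let a := PySem.List.slice arr none none      -- a = arr[:]
  match PySem.List.pop? a i with               -- a.pop(i); i is always in range in A's loop
  | some p =>
    let gap := pvMaxGap p.2
    if res > gap then gap else res
  | none => res

def min_max_gap (arr : List Int) : Int :=
  (PySem.List.pyRange 1 ((arr.length : Int) - 1) 1).foldl (pvAStep arr)
    (PySem.List.pyGetD arr (-1) 0 - PySem.List.pyGetD arr 0 0)

-- ===== PORT B =====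
-- one iteration of B's loop body; state = (res, q) with q the running prefix maximum
def pvBStep (gaps suf : List Int) (m : Nat) (st : Int × Option Int) (i : Int) : Int × Option Int :=
  let cand := PySem.List.pyGetD gaps (i - 1) 0 + PySem.List.pyGetD gaps i 0
  let cand := match st.2 with
    | some qv => max cand qv
    | none => cand
  let cand := if i + 1 < (m : Int) then max cand (PySem.List.pyGetD suf (i + 1) 0) else cand
  (min st.1 cand,
   some (match st.2 with
     | some qv => max qv (PySem.List.pyGetD gaps (i - 1) 0)
     | none => PySem.List.pyGetD gaps (i - 1) 0))

def min_max_gap_alt (arr : List Int) : Int :=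
  let res := PySem.List.pyGetD arr (-1) 0 - PySem.List.pyGetD arr 0 0
  let gaps := (arr.zip (PySem.List.slice arr (some 1) none)).map (fun p => p.2 - p.1)
  let m := gaps.length
  if m < 2 then res
  else
    -- suffix maxima, built back-to-front, then reversed: suf[k] = max(gaps[k:])
    let suf := ((PySem.List.slice gaps none (some (-1))).reverse).foldl
        (fun acc g => acc ++ [max g (PySem.List.pyGetD acc (-1) 0)])
        [PySem.List.pyGetD gaps (-1) 0]
    let suf := suf.reverse
    ((PySem.List.pyRange 1 (m : Int) 1).foldl (pvBStep gaps suf m) (res, none)).1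

-- ===== PRECONDITION & SPEC =====
-- Pre_ excludes only the empty list, on which A (arr[-1]) raises IndexError (B raises there too).
def Pre_min_max_gap (arr : List Int) : Prop := arr ≠ []
instance (arr : List Int) : Decidable (Pre_min_max_gap arr) := by unfold Pre_min_max_gap; infer_instance
def pvWitness_min_max_gap : List Int := [1, 5, 6, 9]

def Spec_min_max_gap (arr : List Int) (out : Int) : Prop := out = min_max_gap_alt arr
instance (arr : List Int) (out : Int) : Decidable (Spec_min_max_gap arr out) := by unfold Spec_min_max_gap; infer_instance

-- ===== CLAIM (what is proved, stated in full; the proofs are below) =====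
def Claim_equal_min_max_gap : Prop := ∀ (arr : List Int), Dom_min_max_gap arr → Pre_min_max_gap arr → Spec_min_max_gap arr (min_max_gap arr)

-- ===== LEMMAS AND PROOFS =====

-- the list of consecutive gaps of l (what both ports build from zip(l, l[1:]))
def gapsOf (l : List Int) : List Int := (l.zip l.tail).map (fun p => p.2 - p.1)

-- Python's max of a nonempty list (0 on [], never used there)
def nmax : List Int → Int
  | [] => 0
  | x :: t => t.foldl max x

-- max gap after removing element i (1 ≤ i ≤ len-2): the gaps with gaps[i-1], gaps[i] merged
def Cfun (g : List Int) (i : Nat) : Int :=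
  nmax (g.take (i - 1) ++ (g.getD (i - 1) 0 + g.getD i 0) :: g.drop (i + 1))

-- suffix-maxima list: (sufList zs)[k] = max of zs.drop k
def sufList : List Int → List Int
  | [] => []
  | [x] => [x]
  | x :: y :: t => max x ((sufList (y :: t)).headD 0) :: sufList (y :: t)

theorem gapsOf_def (l : List Int) :
    (l.zip (PySem.List.slice l (some 1) none)).map (fun p => p.2 - p.1) = gapsOf l := by
  rw [PySem.List.slice_from_one]; rfl

theorem foldl_max_eq_max (t : List Int) (a x : Int) :
    t.foldl max (max a x) = max a (t.foldl max x) := by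
  induction t generalizing x with
  | nil => rfl
  | cons b t ih => simpa [List.foldl, max_assoc] using ih (max x b)

theorem foldl_max_nonempty (ys : List Int) (hy : ys ≠ []) (a : Int) :
    ys.foldl max a = max a (nmax ys) := by
  match ys with
  | y :: u => simpa [nmax, List.foldl] using foldl_max_eq_max u a y

theorem nmax_cons (x : Int) (t : List Int) (ht : t ≠ []) :
    nmax (x :: t) = max x (nmax t) := by
  simpa [nmax] using foldl_max_nonempty t ht x

theorem nmax_append (xs ys : List Int) (hy : ys ≠ []) :
    nmax (xs ++ ys) = if xs = [] then nmax ys else max (nmax xs) (nmax ys) := by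
  match xs with
  | [] => simp
  | x :: t =>
    simp only [List.cons_append, nmax, List.foldl_append, reduceCtorEq, if_false]
    rw [foldl_max_nonempty ys hy (t.foldl max x)]
    rfl

theorem length_gapsOf (l : List Int) : (gapsOf l).length = l.length - 1 := by
  simp [gapsOf, List.length_zip, List.length_tail]

theorem getElem_gapsOf (l : List Int) (k : Nat) (h : k < (gapsOf l).length) :
    (gapsOf l)[k] = l[k + 1]'(by have := length_gapsOf l; omega) - l[k]'(by have := length_gapsOf l; omega) := by
  simp [gapsOf, List.getElem_zip, List.getElem_tail]

theorem getD_gapsOf (l : List Int) (k : Nat) (h : k + 1 < l.length) :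
    (gapsOf l).getD k 0 = l[k + 1] - l[k] := by
  have hlen := length_gapsOf l
  rw [List.getD_eq_getElem _ _ (by omega), getElem_gapsOf]

-- gaps of the list with element j removed = the gaps with gaps[j-1], gaps[j] merged
theorem gapsOf_eraseIdx (l : List Int) (j : Nat) (h1 : 1 ≤ j) (h2 : j + 2 ≤ l.length) :
    gapsOf (l.eraseIdx j) =
      (gapsOf l).take (j - 1) ++
        ((gapsOf l).getD (j - 1) 0 + (gapsOf l).getD j 0) :: (gapsOf l).drop (j + 1) := by
  have hg := length_gapsOf l
  have hge : (l.eraseIdx j).length = l.length - 1 := by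
    rw [List.length_eraseIdx]; simp only [if_pos (by omega : j < l.length)]
  have hge2 := length_gapsOf (l.eraseIdx j)
  have htake : ((gapsOf l).take (j - 1)).length = j - 1 := by
    rw [List.length_take]; omega
  apply List.ext_getElem
  · simp only [hge2, hge, List.length_append, List.length_cons, htake, List.length_drop, hg]
    omega
  intro k hk1 hk2
  have hk : k < l.length - 2 := by omega
  rw [getElem_gapsOf _ _ (by omega)]
  rw [List.getElem_eraseIdx, List.getElem_eraseIdx]
  rcases lt_trichotomy k (j - 1) with hc | hc | hc
  · rw [List.getElem_append_left (by omega : k < ((gapsOf l).take (j - 1)).length)]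
    rw [List.getElem_take, getElem_gapsOf _ _ (by omega)]
    rw [dif_pos (by omega : k + 1 < j), dif_pos (by omega : k < j)]
  · rw [List.getElem_append_right (by omega : ((gapsOf l).take (j - 1)).length ≤ k)]
    have e0 : k - ((gapsOf l).take (j - 1)).length = 0 := by omega
    simp only [e0, List.getElem_cons_zero]
    rw [getD_gapsOf _ _ (by omega : (j - 1) + 1 < l.length), getD_gapsOf _ _ (by omega : j + 1 < l.length)]
    rw [dif_neg (by omega : ¬ k + 1 < j), dif_pos (by omega : k < j)]
    have ej : j - 1 + 1 = j := by omega
    have ek1 : k + 1 + 1 = j + 1 := by omega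
    have ek : k = j - 1 := hc
    simp only [ej, ek1, ek]
    ring
  · rw [List.getElem_append_right (by omega : ((gapsOf l).take (j - 1)).length ≤ k)]
    have e1 : k - ((gapsOf l).take (j - 1)).length = (k - j) + 1 := by omega
    simp only [e1, List.getElem_cons_succ]
    rw [List.getElem_drop, getElem_gapsOf _ _ (by omega)]
    rw [dif_neg (by omega : ¬ k + 1 < j), dif_neg (by omega : ¬ k < j)]
    have e2 : j + 1 + (k - j) + 1 = k + 1 + 1 := by omega
    have e3 : j + 1 + (k - j) = k + 1 := by omega
    simp only [e2, e3]

theorem length_sufList : ∀ (zs : List Int), (sufList zs).length = zs.length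
  | [] => by simp [sufList]
  | [x] => by simp [sufList]
  | x :: y :: t => by
    simp [sufList, length_sufList (y :: t)]

theorem headD_sufList : ∀ (zs : List Int), zs ≠ [] → (sufList zs).headD 0 = nmax zs
  | [x], _ => by simp [sufList, nmax]
  | x :: y :: t, _ => by
    simp only [sufList, List.headD_cons]
    rw [headD_sufList (y :: t) (by simp), nmax_cons x (y :: t) (by simp)]

theorem getD_sufList : ∀ (zs : List Int) (k : Nat), k < zs.length →
    (sufList zs).getD k 0 = nmax (zs.drop k)
  | [x], 0, _ => by simp [sufList, nmax]
  | x :: y :: t, 0, _ => by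
    have h := headD_sufList (x :: y :: t) (by simp)
    simpa [sufList] using h
  | x :: y :: t, k + 1, hk => by
    simp only [sufList, List.getD_cons_succ, List.drop_succ_cons]
    exact getD_sufList (y :: t) k (by simpa using Nat.lt_of_succ_lt_succ hk)

theorem suf_fold_eq : ∀ (zs : List Int), zs ≠ [] →
    (zs.dropLast.reverse).foldl
        (fun acc g => acc ++ [max g (PySem.List.pyGetD acc (-1) 0)])
        [PySem.List.pyGetD zs (-1) 0] = (sufList zs).reverse
  | [x], _ => by
    simp [sufList]
    rw [PySem.List.pyGetD_neg_one _ _ (by simp : ([x] : List Int) ≠ [])]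
    simp
  | x :: y :: t, _ => by
    have ih := suf_fold_eq (y :: t) (by simp)
    have hlast : PySem.List.pyGetD (x :: y :: t) (-1) 0 = PySem.List.pyGetD (y :: t) (-1) 0 := by
      rw [PySem.List.pyGetD_neg_one _ _ (by simp : (x :: y :: t : List Int) ≠ []),
          PySem.List.pyGetD_neg_one _ _ (by simp : (y :: t : List Int) ≠ [])]
      exact List.getLast_cons _
    have hdl : (x :: y :: t).dropLast = x :: (y :: t).dropLast := rfl
    rw [hdl, List.reverse_cons, List.foldl_append, hlast, ih]
    obtain ⟨a, u, he⟩ := List.exists_cons_of_ne_nil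
      (show sufList (y :: t) ≠ [] by
        intro h; have := length_sufList (y :: t); rw [h] at this; simp at this)
    have hhd : PySem.List.pyGetD ((sufList (y :: t)).reverse) (-1) 0 = (sufList (y :: t)).headD 0 := by
      rw [he, List.reverse_cons, PySem.List.pyGetD_neg_one_append_singleton, List.headD_cons]
    simp only [List.foldl_cons, List.foldl_nil, hhd]
    show (sufList (y :: t)).reverse ++ [max x ((sufList (y :: t)).headD 0)] = (sufList (x :: y :: t)).reverse
    rw [show sufList (x :: y :: t) = max x ((sufList (y :: t)).headD 0) :: sufList (y :: t) from rfl]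
    rw [List.reverse_cons]

theorem pvMaxGap_eq (l : List Int) (h : 2 ≤ l.length) : pvMaxGap l = nmax (gapsOf l) := by
  have hg : gapsOf l ≠ [] := by
    have := length_gapsOf l
    intro he; rw [he] at this; simp at this; omega
  obtain ⟨a, t, he⟩ := List.exists_cons_of_ne_nil hg
  simp only [pvMaxGap, gapsOf_def]
  rw [he, PySem.List.max?_id_cons]
  simp [nmax]

theorem pvAStep_eq (arr : List Int) (r : Int) (j : Nat) (h1 : 1 ≤ j) (h2 : j + 2 ≤ arr.length) :
    pvAStep arr r (j : Int) = min r (Cfun (gapsOf arr) j) := by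
  have hp := PySem.List.pop?_natCast arr j (by omega)
  dsimp only [pvAStep]
  rw [PySem.List.slice_none_none, hp]
  show (if r > pvMaxGap (arr.eraseIdx j) then pvMaxGap (arr.eraseIdx j) else r)
      = min r (Cfun (gapsOf arr) j)
  rw [pvMaxGap_eq _ (by
        rw [List.length_eraseIdx]
        simp only [if_pos (show j < arr.length by omega)]
        omega)]
  rw [gapsOf_eraseIdx arr j h1 h2]
  show (if r > Cfun (gapsOf arr) j then Cfun (gapsOf arr) j else r) = min r (Cfun (gapsOf arr) j)
  simp only [gt_iff_lt, min_def]
  split_ifs <;> omega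

theorem take_one_nmax (g : List Int) (hg : g ≠ []) : nmax (g.take 1) = g.getD 0 0 := by
  obtain ⟨a, t, he⟩ := List.exists_cons_of_ne_nil hg
  subst he
  simp [nmax]

theorem nmax_take_succ (g : List Int) (j : Nat) (h1 : 1 ≤ j) (hj : j < g.length) :
    nmax (g.take (j + 1)) = max (nmax (g.take j)) (g.getD j 0) := by
  rw [List.take_succ, List.getElem?_eq_getElem hj]
  rw [nmax_append _ _ (by simp)]
  rw [if_neg (by
    intro h
    have := List.length_take_of_le (Nat.le_of_lt hj) (l := g)
    rw [h] at this; simp at this; omega)]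
  rw [List.getD_eq_getElem _ _ hj]
  rfl

theorem Cfun_one (g : List Int) (hm : 2 ≤ g.length) :
    Cfun g 1 = if 2 < g.length
      then max (g.getD 0 0 + g.getD 1 0) (nmax (g.drop 2))
      else g.getD 0 0 + g.getD 1 0 := by
  unfold Cfun
  simp only [show (1 : Nat) - 1 = 0 from rfl, show (1 : Nat) + 1 = 2 from rfl,
    List.take_zero, List.nil_append]
  by_cases hlt : 2 < g.length
  · rw [if_pos hlt, nmax_cons _ _ (by
      intro h; rw [List.drop_eq_nil_iff] at h; omega)]
  · rw [if_neg hlt, List.drop_eq_nil_of_le (by omega)]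
    rfl

theorem Cfun_big (g : List Int) (j : Nat) (hj : 2 ≤ j) (h2 : j + 1 ≤ g.length) :
    Cfun g j = if j + 1 < g.length
      then max (max (g.getD (j - 1) 0 + g.getD j 0) (nmax (g.take (j - 1)))) (nmax (g.drop (j + 1)))
      else max (g.getD (j - 1) 0 + g.getD j 0) (nmax (g.take (j - 1))) := by
  have hgne : g ≠ [] := by intro h; rw [h] at h2; simp at h2
  unfold Cfun
  rw [nmax_append _ _ (by simp)]
  rw [if_neg (show ¬ g.take (j - 1) = [] by
        rw [List.take_eq_nil_iff]; push_neg; exact ⟨by omega, hgne⟩)]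
  by_cases hlt : j + 1 < g.length
  · rw [if_pos hlt, nmax_cons _ _ (by
      intro h; rw [List.drop_eq_nil_iff] at h; omega)]
    rw [← max_assoc, max_comm (nmax (g.take (j - 1))) (g.getD (j - 1) 0 + g.getD j 0)]
  · rw [if_neg hlt, List.drop_eq_nil_of_le (by omega)]
    have hone : nmax [g.getD (j - 1) 0 + g.getD j 0] = g.getD (j - 1) 0 + g.getD j 0 := rfl
    rw [hone, max_comm]

theorem pvBStep_eq_one (g : List Int) (hm : 2 ≤ g.length) (r : Int) :
    pvBStep g (sufList g) g.length (r, none) ((1 : Nat) : Int)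
      = (min r (Cfun g 1), some (nmax (g.take 1))) := by
  show (min r (if ((1 : Nat) : Int) + 1 < (g.length : Int)
        then max (PySem.List.pyGetD g (((1 : Nat) : Int) - 1) 0 + PySem.List.pyGetD g ((1 : Nat) : Int) 0)
                 (PySem.List.pyGetD (sufList g) (((1 : Nat) : Int) + 1) 0)
        else PySem.List.pyGetD g (((1 : Nat) : Int) - 1) 0 + PySem.List.pyGetD g ((1 : Nat) : Int) 0),
      some (PySem.List.pyGetD g (((1 : Nat) : Int) - 1) 0)) = _
  rw [show ((1 : Nat) : Int) - 1 = ((0 : Nat) : Int) from by norm_num,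
      show ((1 : Nat) : Int) + 1 = ((2 : Nat) : Int) from by norm_num]
  simp only [PySem.List.pyGetD_natCast]
  rw [take_one_nmax g (by intro h; rw [h] at hm; simp at hm), Cfun_one g hm]
  by_cases hlt : 2 < g.length
  · rw [if_pos (show ((2 : Nat) : Int) < (g.length : Int) from by exact_mod_cast hlt),
        if_pos hlt, getD_sufList g 2 hlt]
  · rw [if_neg (show ¬ ((2 : Nat) : Int) < (g.length : Int) from by exact_mod_cast hlt),
        if_neg hlt]

theorem pvBStep_eq_big (g : List Int) (hm : 2 ≤ g.length) (r : Int) (j : Nat)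
    (hj : 2 ≤ j) (h2 : j + 1 ≤ g.length) :
    pvBStep g (sufList g) g.length (r, some (nmax (g.take (j - 1)))) (j : Int)
      = (min r (Cfun g j), some (nmax (g.take j))) := by
  show (min r (if (j : Int) + 1 < (g.length : Int)
        then max (max (PySem.List.pyGetD g ((j : Int) - 1) 0 + PySem.List.pyGetD g (j : Int) 0) (nmax (g.take (j - 1))))
                 (PySem.List.pyGetD (sufList g) ((j : Int) + 1) 0)
        else max (PySem.List.pyGetD g ((j : Int) - 1) 0 + PySem.List.pyGetD g (j : Int) 0) (nmax (g.take (j - 1)))),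
      some (max (nmax (g.take (j - 1))) (PySem.List.pyGetD g ((j : Int) - 1) 0))) = _
  rw [show (j : Int) - 1 = ((j - 1 : Nat) : Int) from by omega,
      show (j : Int) + 1 = ((j + 1 : Nat) : Int) from by omega]
  simp only [PySem.List.pyGetD_natCast]
  have hsnd : max (nmax (g.take (j - 1))) (g.getD (j - 1) 0) = nmax (g.take j) := by
    have h := nmax_take_succ g (j - 1) (by omega) (by omega)
    rw [show j - 1 + 1 = j from by omega] at h
    exact h.symm
  rw [hsnd, Cfun_big g j hj h2]
  by_cases hlt : j + 1 < g.length
  · rw [if_pos (show ((j + 1 : Nat) : Int) < (g.length : Int) from by exact_mod_cast hlt),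
        if_pos hlt, getD_sufList g (j + 1) hlt]
  · rw [if_neg (show ¬ ((j + 1 : Nat) : Int) < (g.length : Int) from by exact_mod_cast hlt),
        if_neg hlt]

theorem A_loop (arr : List Int) (r0 : Int) :
    ∀ (j : Nat), 1 ≤ j → j + 1 ≤ arr.length →
    (PySem.List.pyRange 1 (j : Int) 1).foldl (pvAStep arr) r0
      = (List.range' 1 (j - 1)).foldl (fun r i => min r (Cfun (gapsOf arr) i)) r0 := by
  intro j
  induction j with
  | zero => omega
  | succ j ih =>
    intro _ h2
    by_cases hj : j = 0
    · subst hj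
      rw [PySem.List.pyRange_one_eq_nil (by norm_num)]
      rfl
    · have hj1 : 1 ≤ j := by omega
      have ec : ((j + 1 : Nat) : Int) = (j : Int) + 1 := by push_cast; ring
      rw [ec, PySem.List.pyRange_one_succ_right (by exact_mod_cast hj1), List.foldl_append]
      rw [ih hj1 (by omega)]
      have er : j + 1 - 1 = (j - 1) + 1 := by omega
      rw [er, List.range'_concat, List.foldl_append]
      simp only [List.foldl_cons, List.foldl_nil]
      rw [pvAStep_eq arr _ j hj1 (by omega)]
      rw [show 1 + 1 * (j - 1) = j from by omega]

theorem B_loop (g : List Int) (hm : 2 ≤ g.length) (r0 : Int) :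
    ∀ (j : Nat), 1 ≤ j → j ≤ g.length →
    (PySem.List.pyRange 1 (j : Int) 1).foldl (pvBStep g (sufList g) g.length) (r0, none)
      = ((List.range' 1 (j - 1)).foldl (fun r i => min r (Cfun g i)) r0,
         if j = 1 then none else some (nmax (g.take (j - 1)))) := by
  intro j
  induction j with
  | zero => omega
  | succ j ih =>
    intro _ h2
    by_cases hj : j = 0
    · subst hj
      rw [PySem.List.pyRange_one_eq_nil (by norm_num)]
      rfl
    · have hj1 : 1 ≤ j := by omega
      have ec : ((j + 1 : Nat) : Int) = (j : Int) + 1 := by push_cast; ring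
      rw [ec, PySem.List.pyRange_one_succ_right (by exact_mod_cast hj1), List.foldl_append]
      rw [ih hj1 (by omega)]
      simp only [List.foldl_cons, List.foldl_nil]
      have er : j + 1 - 1 = (j - 1) + 1 := by omega
      rw [er, List.range'_concat, List.foldl_append]
      simp only [List.foldl_cons, List.foldl_nil]
      rw [show 1 + 1 * (j - 1) = j from by omega]
      rw [if_neg (show ¬ j + 1 = 1 by omega)]
      rw [show j - 1 + 1 = j from by omega]
      by_cases hb : j = 1
      · rw [if_pos hb]
        subst hb
        exact pvBStep_eq_one g hm _
      · rw [if_neg hb]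
        exact pvBStep_eq_big g hm _ j (by omega) (by omega)

-- ===== VERDICT (by name: the statement is the Claim_ definition above) =====
theorem min_max_gap_spec : Claim_equal_min_max_gap := by
  intro arr _ hpre
  unfold Spec_min_max_gap min_max_gap min_max_gap_alt
  simp only [gapsOf_def]
  have hn : 1 ≤ arr.length := List.length_pos_of_ne_nil hpre
  have hg := length_gapsOf arr
  by_cases hsmall : (gapsOf arr).length < 2
  · rw [if_pos hsmall, PySem.List.pyRange_one_eq_nil (by omega)]
    rfl
  · rw [if_neg hsmall]
    have hm : 2 ≤ (gapsOf arr).length := by omega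
    have hgne : gapsOf arr ≠ [] := by intro h; rw [h] at hm; simp at hm
    rw [PySem.List.slice_to_neg_one, suf_fold_eq (gapsOf arr) hgne, List.reverse_reverse]
    rw [show ((arr.length : Int) - 1) = (((gapsOf arr).length : Nat) : Int) from by omega]
    rw [A_loop arr _ (gapsOf arr).length (by omega) (by omega)]
    rw [B_loop (gapsOf arr) hm _ (gapsOf arr).length (by omega) (by omega)]
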